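-- pv_equiv track=rewrite | github.com/qiuqiumaoearth/lanqiaobei | 练/数的计算.py | find
-- ===== SOURCE A (Python) =====
-- def find(num) :
--   res = 1
--   mid = num // 2
--   if mid != 0 :
--     for i in range (1,mid + 1) :
--       res += find(i)
--   else :
--     return 1
--   return res
-- ===== SOURCE B (Python) =====
-- def find(num):
--     # Bottom-up DP with prefix sums: S[k] = f(1)+...+f(k), where f(i) = 1 + S[i//2].
--     mid = num // 2
--     if mid <= 0:
--         return 1
--     S = [0]
--     for i in range(1, mid + 1):
--         S.append(S[i - 1] + 1 + S[i // 2])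
--     return 1 + S[mid]
-- ===== Notes on version B (the rewrite author's own statement) =====
-- stated objective: faster
-- what changed: Replaces the naive recursion, which recomputes the same subproblems exponentially often, by a bottom-up table of prefix sums of the function's values, from which each new value is read off in constant time.
import Mathlib
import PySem

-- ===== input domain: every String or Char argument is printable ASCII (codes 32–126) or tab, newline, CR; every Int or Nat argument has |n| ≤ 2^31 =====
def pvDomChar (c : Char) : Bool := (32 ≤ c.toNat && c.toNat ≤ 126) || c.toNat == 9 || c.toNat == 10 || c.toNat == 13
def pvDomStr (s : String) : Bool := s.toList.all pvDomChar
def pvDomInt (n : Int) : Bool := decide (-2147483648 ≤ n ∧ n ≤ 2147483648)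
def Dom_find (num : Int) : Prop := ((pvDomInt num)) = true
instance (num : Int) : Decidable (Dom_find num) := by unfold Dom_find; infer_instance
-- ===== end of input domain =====

-- B replaces A's naive recursion by a bottom-up prefix-sum DP table (objective: faster).

-- ===== PORT A =====
def find (num : Int) : Int :=
  let mid := PySem.Int.floordiv num 2
  if mid ≠ 0 then
    ((PySem.List.pyRange 1 (mid + 1) 1).attach).foldl
      (fun res i => res + find i.1) 1
  else 1
termination_by num.toNat
decreasing_by
  have hi := (PySem.List.mem_pyRange_one.mp i.2)
  have h2 : 2 ≤ num := by
    have h1 : 1 ≤ PySem.Int.floordiv num 2 := by omega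
    have := PySem.Int.le_floordiv_iff_mul_le (q := 1) (a := num) (b := 2) (by omega)
    omega
  have hlt : PySem.Int.floordiv num 2 < num := by
    have := PySem.Int.floordiv_lt_iff_lt_mul (q := num) (a := num) (b := 2) (by omega)
    omega
  omega

-- ===== PORT B =====
def find_alt (num : Int) : Int :=
  let mid := PySem.Int.floordiv num 2
  if mid ≤ 0 then 1
  else
    let S := (PySem.List.pyRange 1 (mid + 1) 1).foldl
      (fun S i => S ++ [S.getD (i - 1).toNat 0 + 1 + S.getD (PySem.Int.floordiv i 2).toNat 0]) [0]
    1 + S.getD mid.toNat 0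

-- ===== PRECONDITION & SPEC =====
def Spec_find (num : Int) (out : Int) : Prop := out = find_alt num
instance (num : Int) (out : Int) : Decidable (Spec_find num out) := by unfold Spec_find; infer_instance

-- ===== CLAIM (what is proved, stated in full; the proofs are below) =====
def Claim_equal_find : Prop := ∀ (num : Int), Dom_find num → Spec_find num (find num)

-- ===== LEMMAS AND PROOFS =====

/-- Prefix sums of `find` over `1..k`. -/
def Ssum (k : Nat) : Int := ((List.range k).map (fun j : Nat => find ((j : Int) + 1))).sum

theorem Ssum_succ (k : Nat) : Ssum (k + 1) = Ssum k + find ((k : Int) + 1) := by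
  simp [Ssum, List.range_succ]

theorem foldl_attach_sum (f : Int → Int) (l : List Int) (s : Int) :
    (l.attach).foldl (fun res i => res + f i.1) s = s + (l.map f).sum := by
  induction l generalizing s with
  | nil => simp
  | cons a t ih =>
    simp only [List.attach_cons, List.foldl_cons, List.foldl_map, List.map_cons, List.sum_cons]
    rw [show (t.attach.foldl (fun res i => res + f i.1) (s + f a)) = s + f a + (t.map f).sum from ih (s + f a)]
    ring

theorem find_eq (num : Int) :
    find num =
      if 1 ≤ PySem.Int.floordiv num 2 then 1 + Ssum (PySem.Int.floordiv num 2).toNat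
      else 1 := by
  rw [find]
  rcases lt_trichotomy (PySem.Int.floordiv num 2) 0 with h | h | h
  · have hne : PySem.Int.floordiv num 2 ≠ 0 := by omega
    have hr : PySem.List.pyRange 1 (PySem.Int.floordiv num 2 + 1) 1 = [] := by
      rw [PySem.List.pyRange_one,
        show (PySem.Int.floordiv num 2 + 1 - 1).toNat = 0 by omega]
      simp
    rw [if_pos hne, hr, if_neg (show ¬ (1 : Int) ≤ PySem.Int.floordiv num 2 by omega)]
    simp
  · rw [if_neg (show ¬ (PySem.Int.floordiv num 2 ≠ 0) by omega),
      if_neg (show ¬ (1 : Int) ≤ PySem.Int.floordiv num 2 by omega)]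
  · have hne : PySem.Int.floordiv num 2 ≠ 0 := by omega
    have h1 : (1 : Int) ≤ PySem.Int.floordiv num 2 := by omega
    rw [if_pos hne, if_pos h1, foldl_attach_sum]
    congr 1
    rw [PySem.List.pyRange_one, List.map_map]
    unfold Ssum
    rw [show (PySem.Int.floordiv num 2 + 1 - 1).toNat = (PySem.Int.floordiv num 2).toNat by omega]
    congr 1
    apply List.map_congr_left
    intro k _
    simp only [Function.comp]
    rw [add_comm]

theorem find_pos (i : Int) (h : 1 ≤ i) :
    find i = 1 + Ssum (PySem.Int.floordiv i 2).toNat := by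
  by_cases h1 : (1 : Int) ≤ PySem.Int.floordiv i 2
  · rw [find_eq, if_pos h1]
  · have hnn : 0 ≤ PySem.Int.floordiv i 2 := by
      rw [PySem.Int.floordiv_eq_ediv_of_pos (by omega)]
      exact Int.ediv_nonneg (by omega) (by omega)
    have h0 : (PySem.Int.floordiv i 2).toNat = 0 := by omega
    rw [find_eq, if_neg h1, h0]
    simp [Ssum]

def bstep (S : List Int) (i : Int) : List Int :=
  S ++ [S.getD (i - 1).toNat 0 + 1 + S.getD (PySem.Int.floordiv i 2).toNat 0]

theorem loop_invariant (k : Nat) :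
    ((PySem.List.pyRange 1 ((k : Int) + 1) 1).foldl bstep [0]).length = k + 1 ∧
    ∀ j : Nat, j ≤ k →
      ((PySem.List.pyRange 1 ((k : Int) + 1) 1).foldl bstep [0]).getD j 0 = Ssum j := by
  induction k with
  | zero =>
    refine ⟨by simp, ?_⟩
    intro j hj
    interval_cases j
    simp [Ssum]
  | succ k ih =>
    obtain ⟨ihl, ihg⟩ := ih
    have hr : PySem.List.pyRange 1 (((k + 1 : Nat) : Int) + 1) 1 =
        PySem.List.pyRange 1 ((k : Int) + 1) 1 ++ [(k : Int) + 1] := by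
      push_cast
      exact PySem.List.pyRange_one_succ_right (by omega)
    rw [hr, List.foldl_append]
    set Sk := (PySem.List.pyRange 1 ((k : Int) + 1) 1).foldl bstep [0] with hSk
    simp only [List.foldl_cons, List.foldl_nil]
    have hstep : bstep Sk ((k : Int) + 1) = Sk ++ [Ssum (k + 1)] := by
      unfold bstep
      have e1 : (((k : Int) + 1) - 1).toNat = k := by omega
      have e2 : (PySem.Int.floordiv ((k : Int) + 1) 2).toNat = (k + 1) / 2 := by
        have := PySem.Int.floordiv_natCast (k + 1) 2
        push_cast at this
        omega
      rw [e1, e2, ihg k (le_refl k), ihg ((k + 1) / 2) (by omega)]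
      rw [Ssum_succ, find_pos ((k : Int) + 1) (by omega), e2]
      ring_nf
    rw [hstep]
    constructor
    · simp [ihl]
    · intro j hj
      by_cases hjk : j ≤ k
      · rw [List.getD_append _ _ _ _ (by omega)]
        exact ihg j hjk
      · have hje : j = k + 1 := by omega
        rw [hje, List.getD_append_right _ _ _ _ (by omega)]
        simp [ihl]

theorem find_alt_eq (num : Int) :
    find_alt num =
      if PySem.Int.floordiv num 2 ≤ 0 then 1
      else 1 + ((PySem.List.pyRange 1 (PySem.Int.floordiv num 2 + 1) 1).foldl bstep [0]).getD
        (PySem.Int.floordiv num 2).toNat 0 := rfl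

-- ===== VERDICT (by name: the statement is the Claim_ definition above) =====
theorem find_spec : Claim_equal_find := by
  intro num _
  unfold Spec_find
  rw [find_eq, find_alt_eq]
  by_cases hm : PySem.Int.floordiv num 2 ≤ 0
  · rw [if_pos hm, if_neg (show ¬ (1 : Int) ≤ PySem.Int.floordiv num 2 by omega)]
  · have h1 : (1 : Int) ≤ PySem.Int.floordiv num 2 := by omega
    rw [if_neg hm, if_pos h1]
    congr 1
    have hc : (((PySem.Int.floordiv num 2).toNat : Int)) = PySem.Int.floordiv num 2 := by omega
    obtain ⟨_, hg⟩ := loop_invariant (PySem.Int.floordiv num 2).toNat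
    rw [hc] at hg
    exact (hg (PySem.Int.floordiv num 2).toNat (le_refl _)).symm
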